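-- pv_equiv track=rewrite | github.com/SuperInstance/forgemaster | experiments/shallow_side_constraint.py | shallow_route
-- ===== SOURCE A (Python) =====
-- def shallow_route(answers_with_classification):
--     """Route based on shallow-side constraint: trust computation over echo."""
--     for ans, cls in answers_with_classification:
--         if cls == "CORRECT":
--             return "ACCEPT", ans
--     for ans, cls in answers_with_classification:
--         if cls.startswith("PARTIAL"):
--             return "SCAFFOLD", f"Model computed {cls}, needs combination help"
--     for ans, cls in answers_with_classification:
--         if cls == "ECHO":
--             return "REJECT", f"All agents echoed inputs, can't compute"
--     return "UNKNOWN", "No recognizable output"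
-- ===== SOURCE B (Python) =====
-- def shallow_route(answers_with_classification):
--     """Single pass: return on first CORRECT, otherwise remember first PARTIAL* cls and whether any ECHO was seen."""
--     partial_cls = None
--     saw_echo = False
--     for ans, cls in answers_with_classification:
--         if cls == "CORRECT":
--             return "ACCEPT", ans
--         if partial_cls is None and cls.startswith("PARTIAL"):
--             partial_cls = cls
--         if cls == "ECHO":
--             saw_echo = True
--     if partial_cls is not None:
--         return "SCAFFOLD", f"Model computed {partial_cls}, needs combination help"
--     if saw_echo:
--         return "REJECT", "All agents echoed inputs, can't compute"
--     return "UNKNOWN", "No recognizable output"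
-- ===== Notes on version B (the rewrite author's own statement) =====
-- stated objective: simpler
-- what changed: Replaces A's three priority-ordered scans over the list with one single pass that returns on the first CORRECT and accumulates the first PARTIAL* classification and an ECHO flag.
import Mathlib
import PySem

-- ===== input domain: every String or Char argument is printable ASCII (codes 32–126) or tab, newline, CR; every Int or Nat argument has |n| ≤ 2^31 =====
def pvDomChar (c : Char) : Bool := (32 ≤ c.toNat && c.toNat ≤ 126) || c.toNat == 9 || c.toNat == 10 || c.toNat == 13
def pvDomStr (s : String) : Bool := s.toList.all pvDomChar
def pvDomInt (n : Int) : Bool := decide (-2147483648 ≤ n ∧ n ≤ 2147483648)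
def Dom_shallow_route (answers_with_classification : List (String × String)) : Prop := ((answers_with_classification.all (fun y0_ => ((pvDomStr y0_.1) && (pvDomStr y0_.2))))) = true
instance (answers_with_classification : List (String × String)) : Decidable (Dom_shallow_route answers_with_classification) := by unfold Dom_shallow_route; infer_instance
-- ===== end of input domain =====

-- B replaces A's three priority-ordered scans with one single pass (objective: simpler).
-- ===== PORT A =====
-- first loop of A: return ("ACCEPT", ans) on the first cls == "CORRECT"
def pvPassCorrect : List (String × String) → Option (String × String)
  | [] => none
  | (ans, cls) :: rest =>
      if cls == "CORRECT" then some ("ACCEPT", ans) else pvPassCorrect rest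

-- second loop of A: first cls that startswith "PARTIAL"
def pvPassPartial : List (String × String) → Option (String × String)
  | [] => none
  | (_, cls) :: rest =>
      if PySem.Str.startswith cls "PARTIAL" then
        some ("SCAFFOLD", "Model computed " ++ cls ++ ", needs combination help")
      else pvPassPartial rest

-- third loop of A: first cls == "ECHO"
def pvPassEcho : List (String × String) → Option (String × String)
  | [] => none
  | (_, cls) :: rest =>
      if cls == "ECHO" then some ("REJECT", "All agents echoed inputs, can't compute")
      else pvPassEcho rest

def shallow_route (answers_with_classification : List (String × String)) : String × String :=
  match pvPassCorrect answers_with_classification with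
  | some r => r
  | none =>
    match pvPassPartial answers_with_classification with
    | some r => r
    | none =>
      match pvPassEcho answers_with_classification with
      | some r => r
      | none => ("UNKNOWN", "No recognizable output")

-- ===== PORT B =====
-- B's single loop with its two accumulators (first PARTIAL* cls, ECHO flag)
def pvLoopB : List (String × String) → Option String → Bool → String × String
  | [], partialCls, sawEcho =>
      match partialCls with
      | some c => ("SCAFFOLD", "Model computed " ++ c ++ ", needs combination help")
      | none =>
        if sawEcho then ("REJECT", "All agents echoed inputs, can't compute")
        else ("UNKNOWN", "No recognizable output")
  | (ans, cls) :: rest, partialCls, sawEcho =>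
      if cls == "CORRECT" then ("ACCEPT", ans)
      else
        pvLoopB rest
          (if partialCls.isNone && PySem.Str.startswith cls "PARTIAL" then some cls else partialCls)
          (sawEcho || cls == "ECHO")

def shallow_route_alt (answers_with_classification : List (String × String)) : String × String :=
  pvLoopB answers_with_classification none false

-- ===== PRECONDITION & SPEC =====
def Spec_shallow_route (answers_with_classification : List (String × String)) (out : String × String) : Prop := out = shallow_route_alt answers_with_classification
instance (answers_with_classification : List (String × String)) (out : String × String) : Decidable (Spec_shallow_route answers_with_classification out) := by unfold Spec_shallow_route; infer_instance

-- ===== CLAIM (what is proved, stated in full; the proofs are below) =====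
def Claim_equal_shallow_route : Prop := ∀ (answers_with_classification : List (String × String)), Dom_shallow_route answers_with_classification → Spec_shallow_route answers_with_classification (shallow_route answers_with_classification)

-- ===== LEMMAS AND PROOFS =====

-- "ECHO" does not start with "PARTIAL" (closes the head-is-ECHO branch of the loop lemma)
theorem pvEchoNotPartial : PySem.Chars.startswith ['E','C','H','O'] ['P','A','R','T','I','A','L'] = false := by decide

-- the third pass can only ever produce the REJECT tuple
theorem pvPassEcho_some (l : List (String × String)) (r : String × String)
    (h : pvPassEcho l = some r) : r = ("REJECT", "All agents echoed inputs, can't compute") := by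
  induction l with
  | nil => simp [pvPassEcho] at h
  | cons hd tl ih =>
      obtain ⟨a, c⟩ := hd
      simp only [pvPassEcho] at h
      split at h
      · exact (Option.some.inj h).symm
      · exact ih h

-- B's loop, for any accumulator state, computes A's three-pass cascade with the
-- recorded PARTIAL cls (if any) taking precedence over the second pass and the
-- ECHO flag over the third.
theorem pvLoopB_eq (l : List (String × String)) :
    ∀ (p : Option String) (e : Bool),
    pvLoopB l p e =
      match pvPassCorrect l with
      | some r => r
      | none =>
        match p with
        | some c => ("SCAFFOLD", "Model computed " ++ c ++ ", needs combination help")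
        | none =>
          match pvPassPartial l with
          | some r => r
          | none =>
            if e || (pvPassEcho l).isSome then ("REJECT", "All agents echoed inputs, can't compute")
            else ("UNKNOWN", "No recognizable output") := by
  induction l with
  | nil =>
      intro p e
      cases p <;> simp [pvLoopB, pvPassCorrect, pvPassPartial, pvPassEcho]
  | cons hd tl ih =>
      intro p e
      obtain ⟨ans, cls⟩ := hd
      by_cases hc : cls = "CORRECT"
      · simp [pvLoopB, pvPassCorrect, hc]
      · by_cases he : cls = "ECHO"
        · subst he
          cases p <;>
            simp [pvLoopB, pvPassCorrect, pvPassPartial, pvPassEcho, ih, pvEchoNotPartial]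
        · by_cases hp : PySem.Chars.startswith cls.toList ['P','A','R','T','I','A','L'] = true
          · cases p <;>
              simp [pvLoopB, pvPassCorrect, pvPassPartial, hc, hp, ih]
          · cases p <;>
              simp [pvLoopB, pvPassCorrect, pvPassPartial, pvPassEcho, hc, he, hp, ih]

-- ===== VERDICT (by name: the statement is the Claim_ definition above) =====
theorem shallow_route_spec : Claim_equal_shallow_route := by
  intro l _
  unfold Spec_shallow_route shallow_route shallow_route_alt
  rw [pvLoopB_eq]
  cases hC : pvPassCorrect l <;> cases hP : pvPassPartial l <;> cases hE : pvPassEcho l <;>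
    simp_all [fun r => pvPassEcho_some l r]
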